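-- pv_equiv track=rewrite | github.com/legendLEE98/jg-sw-ai-w0205-template | week3/problem-solving/난이도하_분할정복_색종이만들기_실버2.py | check
-- ===== SOURCE A (Python) =====
-- def check(paramPaper, leftX, rightX, leftY, rightY)-> bool:
--     # 전부 흰색일 경우, 전부 파란색일 경우 True
--     # 여기서 카운팅해보기 일단
--     countB = 0
--     countW = 0
--
--     for y in range(leftY, rightY):
--         for x in range(leftX, rightX):
--             if paramPaper[y][x]:
--                 countB += 1
--             else:
--                 countW += 1
--
--             if countB > 0 and countW > 0:
--                 return False
--     return True
-- ===== SOURCE B (Python) =====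
-- def check(paramPaper, leftX, rightX, leftY, rightY) -> bool:
--     blues = sum(bool(paramPaper[y][x])
--                 for y in range(leftY, rightY)
--                 for x in range(leftX, rightX))
--     total = len(range(leftY, rightY)) * len(range(leftX, rightX))
--     return blues == 0 or blues == total
-- ===== Notes on version B (the rewrite author's own statement) =====
-- stated objective: simpler
-- what changed: Replaces the mismatch-detecting early-exit dual-counter loop with a single aggregate: count the blue cells of the region and compare the count with 0 and with the region size.
-- outside the precondition, e.g. on check([[1]], 0, 1, 0, 2): A raises IndexError, B raises IndexError; on check([[1, 0], [5]], 0, 2, 0, 2): A returns False, B raises IndexError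
import Mathlib
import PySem

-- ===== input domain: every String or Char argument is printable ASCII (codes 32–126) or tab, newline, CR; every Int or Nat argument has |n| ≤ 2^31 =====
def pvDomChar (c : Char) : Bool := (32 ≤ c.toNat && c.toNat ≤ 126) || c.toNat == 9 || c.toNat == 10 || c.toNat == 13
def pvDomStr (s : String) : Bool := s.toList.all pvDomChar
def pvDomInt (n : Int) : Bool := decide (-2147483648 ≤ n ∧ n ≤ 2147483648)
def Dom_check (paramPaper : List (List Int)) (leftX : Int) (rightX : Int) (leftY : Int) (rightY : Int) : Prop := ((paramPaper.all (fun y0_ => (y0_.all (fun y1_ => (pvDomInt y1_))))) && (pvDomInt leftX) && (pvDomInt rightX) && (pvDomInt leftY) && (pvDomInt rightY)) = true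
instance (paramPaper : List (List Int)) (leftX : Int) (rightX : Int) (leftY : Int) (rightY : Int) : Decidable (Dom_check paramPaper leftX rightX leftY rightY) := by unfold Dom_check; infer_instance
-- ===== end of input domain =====

-- B replaces A's early-exit dual-counter mismatch scan by one aggregate count of blue
-- cells compared with 0 and with the region size (objective: simpler).

-- ===== PORT A =====
-- inner 'for x in range(leftX, rightX)' loop; none = the early 'return False'
def checkXLoop (row : List Int) (xs : List Int) (countB countW : Int) : Option (Int × Int) :=
  match xs with
  | [] => some (countB, countW)
  | x :: rest =>
    let v := PySem.List.pyGetD row x 0     -- paramPaper[y][x]; in range by Pre_check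
    let countB' := if v ≠ 0 then countB + 1 else countB
    let countW' := if v ≠ 0 then countW else countW + 1
    if countB' > 0 ∧ countW' > 0 then none
    else checkXLoop row rest countB' countW'

-- outer 'for y in range(leftY, rightY)' loop
def checkYLoop (paramPaper : List (List Int)) (leftX rightX : Int) (ys : List Int)
    (countB countW : Int) : Option (Int × Int) :=
  match ys with
  | [] => some (countB, countW)
  | y :: rest =>
    let row := PySem.List.pyGetD paramPaper y []   -- paramPaper[y]; in range by Pre_check
    match checkXLoop row (PySem.List.pyRange leftX rightX 1) countB countW with
    | none => none
    | some (cB, cW) => checkYLoop paramPaper leftX rightX rest cB cW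

def check (paramPaper : List (List Int)) (leftX : Int) (rightX : Int) (leftY : Int) (rightY : Int) : Bool :=
  match checkYLoop paramPaper leftX rightX (PySem.List.pyRange leftY rightY 1) 0 0 with
  | none => false
  | some _ => true

-- ===== PORT B =====
def check_alt (paramPaper : List (List Int)) (leftX : Int) (rightX : Int) (leftY : Int) (rightY : Int) : Bool :=
  let blues : Int :=
    ((PySem.List.pyRange leftY rightY 1).map (fun y =>
      ((PySem.List.pyRange leftX rightX 1).map (fun x =>
        if PySem.List.pyGetD (PySem.List.pyGetD paramPaper y []) x 0 ≠ 0 then (1 : Int) else 0)).sum)).sum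
  let total : Int :=
    ((PySem.List.pyRange leftY rightY 1).length : Int) * ((PySem.List.pyRange leftX rightX 1).length : Int)
  blues == 0 || blues == total

-- ===== PRECONDITION & SPEC =====
-- Pre_check: every visited index is a valid Python index (A raises IndexError on the
-- first out-of-range access).  This also excludes inputs where A's early 'return False'
-- happens to fire BEFORE the out-of-range access — an accident of A's scan order on
-- which B raises; see claim.json cites.
def Pre_check (paramPaper : List (List Int)) (leftX : Int) (rightX : Int) (leftY : Int) (rightY : Int) : Prop :=
  (leftY < rightY ∧ leftX < rightX → -(paramPaper.length : Int) ≤ leftY ∧ rightY ≤ (paramPaper.length : Int)) ∧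
  ∀ pr ∈ paramPaper.zipIdx,
    ((leftY ≤ (pr.2 : Int) ∧ (pr.2 : Int) < rightY) ∨
     (leftY ≤ (pr.2 : Int) - (paramPaper.length : Int) ∧ (pr.2 : Int) - (paramPaper.length : Int) < rightY)) →
    (leftX < rightX → -(pr.1.length : Int) ≤ leftX ∧ rightX ≤ (pr.1.length : Int))
instance (paramPaper : List (List Int)) (leftX : Int) (rightX : Int) (leftY : Int) (rightY : Int) : Decidable (Pre_check paramPaper leftX rightX leftY rightY) := by unfold Pre_check; infer_instance

def pvWitness_check : List (List Int) × Int × Int × Int × Int := ([[1, 0], [1, 1]], 0, 2, 0, 2)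

def Spec_check (paramPaper : List (List Int)) (leftX : Int) (rightX : Int) (leftY : Int) (rightY : Int) (out : Bool) : Prop := out = check_alt paramPaper leftX rightX leftY rightY
instance (paramPaper : List (List Int)) (leftX : Int) (rightX : Int) (leftY : Int) (rightY : Int) (out : Bool) : Decidable (Spec_check paramPaper leftX rightX leftY rightY out) := by unfold Spec_check; infer_instance

-- ===== CLAIM (what is proved, stated in full; the proofs are below) =====
def Claim_equal_check : Prop := ∀ (paramPaper : List (List Int)) (leftX : Int) (rightX : Int) (leftY : Int) (rightY : Int), Dom_check paramPaper leftX rightX leftY rightY → Pre_check paramPaper leftX rightX leftY rightY → Spec_check paramPaper leftX rightX leftY rightY (check paramPaper leftX rightX leftY rightY)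

-- ===== LEMMAS AND PROOFS =====

-- blue / white cell counts of one row over the index list xs
def bluesRow (row : List Int) (xs : List Int) : Int :=
  (xs.map (fun x => if PySem.List.pyGetD row x 0 ≠ 0 then (1 : Int) else 0)).sum
def whitesRow (row : List Int) (xs : List Int) : Int :=
  (xs.map (fun x => if PySem.List.pyGetD row x 0 ≠ 0 then (0 : Int) else 1)).sum

lemma bluesRow_nonneg (row xs) : 0 ≤ bluesRow row xs := by
  induction xs with
  | nil => simp [bluesRow]
  | cons x rest ih =>
    simp only [bluesRow, List.map_cons, List.sum_cons] at *
    split_ifs <;> omega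

lemma whitesRow_nonneg (row xs) : 0 ≤ whitesRow row xs := by
  induction xs with
  | nil => simp [whitesRow]
  | cons x rest ih =>
    simp only [whitesRow, List.map_cons, List.sum_cons] at *
    split_ifs <;> omega

lemma blues_add_whites (row xs) : bluesRow row xs + whitesRow row xs = xs.length := by
  induction xs with
  | nil => simp [bluesRow, whitesRow]
  | cons x rest ih =>
    simp only [bluesRow, whitesRow, List.map_cons, List.sum_cons, List.length_cons] at *
    split_ifs <;> push_cast <;> omega

lemma checkXLoop_eq (row xs : List Int) (cB cW : Int) (hB : 0 ≤ cB) (hW : 0 ≤ cW) :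
    checkXLoop row xs cB cW =
      if 0 < bluesRow row xs + whitesRow row xs ∧
         0 < cB + bluesRow row xs ∧ 0 < cW + whitesRow row xs then none
      else some (cB + bluesRow row xs, cW + whitesRow row xs) := by
  induction xs generalizing cB cW with
  | nil => simp [checkXLoop, bluesRow, whitesRow]
  | cons x rest ih =>
    have hbr := bluesRow_nonneg row rest
    have hwr := whitesRow_nonneg row rest
    simp only [checkXLoop, bluesRow, whitesRow, List.map_cons, List.sum_cons, ne_eq] at *
    by_cases hv : PySem.List.pyGetD row x 0 = 0
    · simp only [hv, not_true_eq_false, if_false]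
      rw [ih cB (cW + 1) (by omega) (by omega)]
      split_ifs <;>
        first
          | rfl
          | (exfalso; omega)
          | (simp only [Option.some.injEq, Prod.mk.injEq]; constructor <;> omega)
    · simp only [hv, not_false_eq_true, if_true]
      rw [ih (cB + 1) cW (by omega) (by omega)]
      split_ifs <;>
        first
          | rfl
          | (exfalso; omega)
          | (simp only [Option.some.injEq, Prod.mk.injEq]; constructor <;> omega)

-- total blue / white counts over the row-index list ys
def bluesAll (paramPaper : List (List Int)) (leftX rightX : Int) (ys : List Int) : Int :=
  (ys.map (fun y => bluesRow (PySem.List.pyGetD paramPaper y []) (PySem.List.pyRange leftX rightX 1))).sum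
def whitesAll (paramPaper : List (List Int)) (leftX rightX : Int) (ys : List Int) : Int :=
  (ys.map (fun y => whitesRow (PySem.List.pyGetD paramPaper y []) (PySem.List.pyRange leftX rightX 1))).sum

lemma bluesAll_nonneg (p lX rX ys) : 0 ≤ bluesAll p lX rX ys := by
  induction ys with
  | nil => simp [bluesAll]
  | cons y rest ih =>
    have := bluesRow_nonneg (PySem.List.pyGetD p y []) (PySem.List.pyRange lX rX 1)
    simp only [bluesAll, List.map_cons, List.sum_cons] at *; omega

lemma whitesAll_nonneg (p lX rX ys) : 0 ≤ whitesAll p lX rX ys := by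
  induction ys with
  | nil => simp [whitesAll]
  | cons y rest ih =>
    have := whitesRow_nonneg (PySem.List.pyGetD p y []) (PySem.List.pyRange lX rX 1)
    simp only [whitesAll, List.map_cons, List.sum_cons] at *; omega

lemma checkYLoop_eq (p : List (List Int)) (lX rX : Int) (ys : List Int) (cB cW : Int)
    (hB : 0 ≤ cB) (hW : 0 ≤ cW) :
    checkYLoop p lX rX ys cB cW =
      if 0 < bluesAll p lX rX ys + whitesAll p lX rX ys ∧
         0 < cB + bluesAll p lX rX ys ∧ 0 < cW + whitesAll p lX rX ys then none
      else some (cB + bluesAll p lX rX ys, cW + whitesAll p lX rX ys) := by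
  induction ys generalizing cB cW with
  | nil => simp [checkYLoop, bluesAll, whitesAll]
  | cons y rest ih =>
    have hb0 := bluesRow_nonneg (PySem.List.pyGetD p y []) (PySem.List.pyRange lX rX 1)
    have hw0 := whitesRow_nonneg (PySem.List.pyGetD p y []) (PySem.List.pyRange lX rX 1)
    have hBr := bluesAll_nonneg p lX rX rest
    have hWr := whitesAll_nonneg p lX rX rest
    simp only [bluesAll, whitesAll, List.map_cons, List.sum_cons] at *
    simp only [checkYLoop]
    by_cases h1 : 0 < bluesRow (PySem.List.pyGetD p y []) (PySem.List.pyRange lX rX 1) +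
                      whitesRow (PySem.List.pyGetD p y []) (PySem.List.pyRange lX rX 1) ∧
                  0 < cB + bluesRow (PySem.List.pyGetD p y []) (PySem.List.pyRange lX rX 1) ∧
                  0 < cW + whitesRow (PySem.List.pyGetD p y []) (PySem.List.pyRange lX rX 1)
    · rw [checkXLoop_eq _ _ cB cW hB hW, if_pos h1]
      split_ifs <;> first | rfl | (exfalso; omega)
    · rw [checkXLoop_eq _ _ cB cW hB hW, if_neg h1]
      show checkYLoop p lX rX rest
            (cB + bluesRow (PySem.List.pyGetD p y []) (PySem.List.pyRange lX rX 1))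
            (cW + whitesRow (PySem.List.pyGetD p y []) (PySem.List.pyRange lX rX 1)) = _
      rw [ih _ _ (by omega) (by omega)]
      split_ifs <;>
        first
          | rfl
          | (exfalso; omega)
          | (simp only [Option.some.injEq, Prod.mk.injEq]; constructor <;> omega)

-- check_alt's blues equals bluesAll, and the region size equals bluesAll + whitesAll
lemma total_eq (p : List (List Int)) (lX rX : Int) (ys : List Int) :
    (ys.length : Int) * ((PySem.List.pyRange lX rX 1).length : Int)
      = bluesAll p lX rX ys + whitesAll p lX rX ys := by
  induction ys with
  | nil => simp [bluesAll, whitesAll]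
  | cons y rest ih =>
    have := blues_add_whites (PySem.List.pyGetD p y []) (PySem.List.pyRange lX rX 1)
    simp only [bluesAll, whitesAll, List.map_cons, List.sum_cons, List.length_cons] at *
    push_cast
    nlinarith [this, ih]

-- ===== VERDICT (by name: the statement is the Claim_ definition above) =====
theorem check_spec : Claim_equal_check := by
  intro p lX rX lY rY _ _
  show check p lX rX lY rY = check_alt p lX rX lY rY
  have halt : check_alt p lX rX lY rY =
      ((bluesAll p lX rX (PySem.List.pyRange lY rY 1) == 0) ||
       (bluesAll p lX rX (PySem.List.pyRange lY rY 1) ==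
         ((PySem.List.pyRange lY rY 1).length : Int) * ((PySem.List.pyRange lX rX 1).length : Int))) := rfl
  rw [halt]
  have hB := bluesAll_nonneg p lX rX (PySem.List.pyRange lY rY 1)
  have hW := whitesAll_nonneg p lX rX (PySem.List.pyRange lY rY 1)
  have htot := total_eq p lX rX (PySem.List.pyRange lY rY 1)
  unfold check
  rw [checkYLoop_eq p lX rX (PySem.List.pyRange lY rY 1) 0 0 le_rfl le_rfl]
  split_ifs with h
  · have hb1 : (bluesAll p lX rX (PySem.List.pyRange lY rY 1) == (0 : Int)) = false := by
      rw [beq_eq_false_iff_ne]; omega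
    have hb2 : (bluesAll p lX rX (PySem.List.pyRange lY rY 1) ==
        ((PySem.List.pyRange lY rY 1).length : Int) * ((PySem.List.pyRange lX rX 1).length : Int)) = false := by
      rw [beq_eq_false_iff_ne, htot]; omega
    rw [hb1, hb2]
    rfl
  · by_cases hb : bluesAll p lX rX (PySem.List.pyRange lY rY 1) = 0
    · rw [hb]; simp
    · have hBT : bluesAll p lX rX (PySem.List.pyRange lY rY 1) =
          ((PySem.List.pyRange lY rY 1).length : Int) * ((PySem.List.pyRange lX rX 1).length : Int) := by
        rw [htot]; omega
      rw [hBT]; simp
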